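-- pv_equiv track=rewrite | github.com/yxzwang/FamilyTool | pipeline/KG_extraction_post_process_make_intermediate_json.py | generate_true_paths
-- ===== SOURCE A (Python) =====
-- import itertools
--
-- def generate_true_paths(outputpath,fakerelationdict,true_relations):
--
--     replaced_path=[]
--     for i,relation in enumerate(outputpath):
--         if relation in true_relations:
--             replaced_path.append([relation])
--         else:
--             replaced_path.append(fakerelationdict[relation])
--     extracted_true_relation_paths=[list(combination) for combination in itertools.product(*replaced_path)]
--     return extracted_true_relation_paths
-- ===== SOURCE B (Python) =====
-- def generate_true_paths(outputpath, fakerelationdict, true_relations):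
--     pools = [[r] if r in true_relations else fakerelationdict[r] for r in outputpath]
--     total = 1
--     for p in pools:
--         total *= len(p)
--     result = []
--     for i in range(total):
--         rem = i
--         combo = []
--         for p in reversed(pools):
--             rem, d = divmod(rem, len(p))
--             combo.append(p[d])
--         combo.reverse()
--         result.append(combo)
--     return result
-- ===== Notes on version B (the rewrite author's own statement) =====
-- stated objective: alternative
-- what changed: Instead of accumulating combinations with itertools.product, B counts them (product of pool lengths) and decodes each index i in range(total) into a path by mixed-radix divmod from the right, indexing directly into the pools.
import Mathlib
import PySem

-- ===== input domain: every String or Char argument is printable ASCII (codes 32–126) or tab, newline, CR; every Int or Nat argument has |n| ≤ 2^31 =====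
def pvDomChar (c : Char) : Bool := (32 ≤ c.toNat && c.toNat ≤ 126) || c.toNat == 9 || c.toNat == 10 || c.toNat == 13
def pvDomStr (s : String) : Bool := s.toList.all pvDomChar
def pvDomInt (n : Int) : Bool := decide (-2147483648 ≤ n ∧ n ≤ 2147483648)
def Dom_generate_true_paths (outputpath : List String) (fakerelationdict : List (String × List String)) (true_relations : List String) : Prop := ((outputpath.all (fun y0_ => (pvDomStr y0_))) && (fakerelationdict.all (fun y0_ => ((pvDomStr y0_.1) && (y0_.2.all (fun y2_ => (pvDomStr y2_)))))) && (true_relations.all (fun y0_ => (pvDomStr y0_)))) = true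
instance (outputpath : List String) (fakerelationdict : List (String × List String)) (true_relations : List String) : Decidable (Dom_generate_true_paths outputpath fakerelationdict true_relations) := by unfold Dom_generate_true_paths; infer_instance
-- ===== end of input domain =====

-- B replaces itertools.product over the pools by mixed-radix index decoding: it counts the
-- combinations (product of pool lengths) and decodes each index i < total into a path by
-- repeated divmod from the right; objective: alternative (same cost, different algorithm).
-- A (and B) raise KeyError when a path relation is neither in true_relations nor a dict key;
-- Pre_ excludes exactly those inputs.

-- ===== PORT A =====
-- itertools.product(*pools), last pool varying fastest
def pyProduct (pools : List (List String)) : List (List String) :=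
  pools.foldr (fun pool acc => pool.flatMap (fun x => acc.map (fun q => x :: q))) [[]]

def generate_true_paths (outputpath : List String) (fakerelationdict : List (String × List String)) (true_relations : List String) : List (List String) :=
  let replaced_path := outputpath.foldl (fun acc relation =>
    if relation ∈ true_relations then acc ++ [[relation]]
    else acc ++ [(PySem.Dict.get? (PySem.Dict.mk fakerelationdict) relation).getD []]) []
  (pyProduct replaced_path).map (fun combination => combination)

-- ===== PORT B =====
-- p[d] is ported as p.getD d "": inside range(total) the digit d is always in range, so this
-- default is never consulted (Python never raises there).
def generate_true_paths_alt (outputpath : List String) (fakerelationdict : List (String × List String)) (true_relations : List String) : List (List String) :=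
  let pools := outputpath.map (fun r =>
    if r ∈ true_relations then [r]
    else (PySem.Dict.get? (PySem.Dict.mk fakerelationdict) r).getD [])
  let total := pools.foldl (fun t p => t * p.length) 1
  (List.range total).map (fun i =>
    let st := pools.reverse.foldl
      (fun (st : Nat × List String) p =>
        (st.1 / p.length, st.2 ++ [p.getD (st.1 % p.length) ""])) (i, [])
    st.2.reverse)

-- ===== PRECONDITION & SPEC =====
-- excludes the inputs on which A (and B) raise KeyError: a path relation missing from both true_relations and the dict
def Pre_generate_true_paths (outputpath : List String) (fakerelationdict : List (String × List String)) (true_relations : List String) : Prop :=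
  (outputpath.all (fun r => true_relations.contains r || fakerelationdict.any (fun kv => kv.1 == r))) = true
instance (outputpath : List String) (fakerelationdict : List (String × List String)) (true_relations : List String) : Decidable (Pre_generate_true_paths outputpath fakerelationdict true_relations) := by unfold Pre_generate_true_paths; infer_instance

def pvWitness_generate_true_paths : List String × (List (String × List String)) × List String :=
  (["r", "s"], [("s", ["x", "y"])], ["r"])

def Spec_generate_true_paths (outputpath : List String) (fakerelationdict : List (String × List String)) (true_relations : List String) (out : List (List String)) : Prop := out = generate_true_paths_alt outputpath fakerelationdict true_relations
instance (outputpath : List String) (fakerelationdict : List (String × List String)) (true_relations : List String) (out : List (List String)) : Decidable (Spec_generate_true_paths outputpath fakerelationdict true_relations out) := by unfold Spec_generate_true_paths; infer_instance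

-- ===== CLAIM =====
def Claim_equal_generate_true_paths : Prop := ∀ (outputpath : List String) (fakerelationdict : List (String × List String)) (true_relations : List String), Dom_generate_true_paths outputpath fakerelationdict true_relations → Pre_generate_true_paths outputpath fakerelationdict true_relations → Spec_generate_true_paths outputpath fakerelationdict true_relations (generate_true_paths outputpath fakerelationdict true_relations)

-- ===== LEMMAS AND PROOFS =====
def pvPool (fakerelationdict : List (String × List String)) (true_relations : List String) (relation : String) : List String :=
  if relation ∈ true_relations then [relation]
  else (PySem.Dict.get? (PySem.Dict.mk fakerelationdict) relation).getD []

-- A's first loop builds exactly the mapped pool list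
theorem pvA_pools (fakerelationdict : List (String × List String)) (true_relations : List String)
    (outputpath : List String) (acc : List (List String)) :
    outputpath.foldl (fun acc relation =>
      if relation ∈ true_relations then acc ++ [[relation]]
      else acc ++ [(PySem.Dict.get? (PySem.Dict.mk fakerelationdict) relation).getD []]) acc
    = acc ++ outputpath.map (pvPool fakerelationdict true_relations) := by
  induction outputpath generalizing acc with
  | nil => simp
  | cons r rest ih =>
    simp only [List.foldl_cons, List.map_cons, pvPool]
    by_cases h : r ∈ true_relations <;> simp [h, ih]

def pvStep (st : Nat × List String) (p : List String) : Nat × List String :=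
  (st.1 / p.length, st.2 ++ [p.getD (st.1 % p.length) ""])

def pvTotal (pools : List (List String)) : Nat := pools.foldl (fun t p => t * p.length) 1

def pvDecode (pools : List (List String)) (i : Nat) : List String :=
  (pools.reverse.foldl pvStep (i, [])).2.reverse

theorem pvStep_fold_shift (l : List (List String)) (r : Nat) (c : List String) :
    l.foldl pvStep (r, c) = ((l.foldl pvStep (r, [])).1, c ++ (l.foldl pvStep (r, [])).2) := by
  induction l generalizing r c with
  | nil => simp
  | cons p rest ih =>
    simp only [List.foldl_cons, pvStep, List.nil_append]
    rw [ih, ih (r / p.length) [p.getD (r % p.length) ""]]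
    simp

theorem pvDecode_snoc (pools : List (List String)) (p : List String) (i : Nat) :
    pvDecode (pools ++ [p]) i = pvDecode pools (i / p.length) ++ [p.getD (i % p.length) ""] := by
  unfold pvDecode
  rw [List.reverse_append, List.reverse_singleton, List.singleton_append, List.foldl_cons]
  show ((pools.reverse.foldl pvStep (pvStep (i, []) p)).2).reverse = _
  rw [show pvStep (i, []) p = (i / p.length, [p.getD (i % p.length) ""]) from rfl]
  rw [pvStep_fold_shift]
  simp

theorem pvTotal_snoc (pools : List (List String)) (p : List String) :
    pvTotal (pools ++ [p]) = pvTotal pools * p.length := by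
  unfold pvTotal; rw [List.foldl_append]; rfl

theorem pvRange_mul_flatMap (n m : Nat) (g : Nat → List String) :
    (List.range (n * m)).map g
      = (List.range n).flatMap (fun q => (List.range m).map (fun r => g (q * m + r))) := by
  induction n with
  | zero => simp
  | succ n ih =>
    rw [Nat.succ_mul, List.range_add, List.range_succ]
    simp [ih, List.map_map, Function.comp_def]

theorem pvMap_range_getD (l : List String) :
    (List.range l.length).map (fun r => l.getD r "") = l := by
  apply List.ext_getElem
  · simp
  · intro i h1 h2
    simp [List.getD_eq_getElem?_getD, List.getElem?_eq_getElem h2]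

theorem pvMap_range_getD' (l : List String) (g : String → List String) :
    (List.range l.length).map (fun r => g (l.getD r "")) = l.map g := by
  conv_rhs => rw [← pvMap_range_getD l]
  rw [List.map_map]
  rfl

theorem pyProduct_base (p : List String) (pools : List (List String)) :
    pools.foldr (fun pool acc => pool.flatMap (fun x => acc.map (fun q => x :: q)))
      (p.map (fun x => [x]))
    = (pyProduct pools).flatMap (fun q => p.map (fun x => q ++ [x])) := by
  induction pools with
  | nil => simp [pyProduct, List.flatMap]
  | cons pool rest ih =>
    simp only [List.foldr_cons, ih, pyProduct]
    rw [List.flatMap_assoc]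
    apply List.flatMap_congr
    intro x hx
    rw [List.flatMap_map, List.map_flatMap]
    apply List.flatMap_congr
    intro q hq
    simp [List.map_map, Function.comp_def]

theorem pyProduct_snoc (pools : List (List String)) (p : List String) :
    pyProduct (pools ++ [p]) = (pyProduct pools).flatMap (fun q => p.map (fun x => q ++ [x])) := by
  unfold pyProduct
  rw [List.foldr_append]
  have hb : List.foldr (fun pool acc => pool.flatMap (fun x => acc.map (fun q => x :: q))) [[]] [p]
      = p.map (fun x => [x]) := by induction p <;> simp_all [List.flatMap]
  rw [hb]
  exact pyProduct_base p pools

-- core: mixed-radix decoding of range(total) enumerates itertools.product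
theorem pvDecode_product (pools : List (List String)) :
    (List.range (pvTotal pools)).map (pvDecode pools) = pyProduct pools := by
  induction pools using List.reverseRecOn with
  | nil => simp [pvTotal, pvDecode, pyProduct, List.range_succ]
  | append_singleton pools p ih =>
    rw [pvTotal_snoc, pyProduct_snoc, ← ih]
    rcases Nat.eq_zero_or_pos p.length with h0 | hpos
    · simp [List.eq_nil_of_length_eq_zero h0]
    · rw [pvRange_mul_flatMap, List.flatMap_map]
      apply List.flatMap_congr
      intro q hq
      rw [← pvMap_range_getD' p (fun x => pvDecode pools q ++ [x])]
      apply List.map_congr_left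
      intro r hr
      have hrlt : r < p.length := List.mem_range.mp hr
      rw [pvDecode_snoc]
      have hdiv : (q * p.length + r) / p.length = q := by
        rw [Nat.mul_comm, Nat.mul_add_div hpos, Nat.div_eq_of_lt hrlt]
        omega
      have hmod : (q * p.length + r) % p.length = r := by
        rw [Nat.mul_comm, Nat.mul_add_mod, Nat.mod_eq_of_lt hrlt]
      rw [hdiv, hmod]

-- ===== VERDICT =====
theorem generate_true_paths_spec : Claim_equal_generate_true_paths := by
  intro outputpath fakerelationdict true_relations _ _
  unfold Spec_generate_true_paths generate_true_paths generate_true_paths_alt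
  rw [pvA_pools]
  have h := pvDecode_product (outputpath.map (pvPool fakerelationdict true_relations))
  simp only [pvTotal] at h
  simp only [List.nil_append, List.map_id_fun', id]
  rw [← h]
  rfl
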